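-- pv_equiv track=rewrite | github.com/ttager16/Turing | artifacts/audit/stage2/traces/sample_10/oracle/candidate_solution.py | find_earliest_slot
-- ===== SOURCE A (Python) =====
-- from typing import List, Dict, Any, Set, Tuple
--
-- def find_earliest_slot(schedule: List[Tuple[int, int]],
--                        max_availability: int,
--                        duration: int,
--                        deadline: int) -> int:
--     """
--     Find the earliest available time slot in a schedule.
--
--     LOGIC:
--     - Schedule contains busy periods: [(start, end), ...]
--     - Need to find a gap of 'duration' days
--     - Must complete before 'deadline' (so start + duration <= deadline)
--     - Total work cannot exceed max_availability
--
--     Args: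
--         schedule: Sorted list of (start, end) tuples representing busy times
--         max_availability: Maximum days the team can work (total)
--         duration: Duration needed for the task (always 1 day for our problem)
--         deadline: Latest time the task must complete
--
--     Returns:
--         Earliest start time (day number), or None if no slot available
--     """
--     # Cannot schedule if invalid constraints
--     if duration > max_availability or duration > deadline or deadline <= 0:
--         return None
--
--     # Calculate total days already used
--     total_used = sum(end - start for start, end in schedule)
--
--     # Check if adding this phase would exceed availability
--     if total_used + duration > max_availability:
--         return None
--
--     # If no schedule yet, start at day 0
--     if not schedule:
--         return 0 if duration <= deadline else None
--
--     # Try to fit before first scheduled item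
--     if schedule[0][0] >= duration and duration <= deadline:
--         return 0
--
--     # Try to fit in gaps between scheduled items
--     for i in range(len(schedule) - 1):
--         gap_start = schedule[i][1]
--         gap_end = schedule[i + 1][0]
--         gap_size = gap_end - gap_start
--
--         if gap_size >= duration and gap_start + duration <= deadline:
--             return gap_start
--
--     # Try to fit after last scheduled item
--     last_end = schedule[-1][1]
--     if last_end + duration <= deadline:
--         return last_end
--
--     return None
-- ===== SOURCE B (Python) =====
-- def find_earliest_slot(schedule, max_availability, duration, deadline):
--     if duration > max_availability or duration > deadline or deadline <= 0:
--         return None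
--     if sum(e - s for s, e in schedule) + duration > max_availability:
--         return None
--     # Scan the candidate slots BACKWARDS, overwriting the result whenever a
--     # slot fits: the last overwrite is the earliest (first-in-forward-order)
--     # fitting slot.  Candidate i starts at the end of interval i-1 (0 for i=0);
--     # the base result is the after-last slot.
--     last_end = schedule[-1][1] if schedule else 0
--     res = last_end if last_end + duration <= deadline else None
--     for i in range(len(schedule) - 1, -1, -1):
--         prev_end = schedule[i - 1][1] if i > 0 else 0
--         if schedule[i][0] - prev_end >= duration and prev_end + duration <= deadline:
--             res = prev_end
--     return res
-- ===== Notes on version B (the rewrite author's own statement) =====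
-- stated objective: alternative
-- what changed: A's forward early-return structure (separate before-first check, indexed loop over interior gaps, after-last check) is replaced by a single backward scan over candidate slots that overwrites an accumulator, computing the first forward match as the last backward match.
import Mathlib
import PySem

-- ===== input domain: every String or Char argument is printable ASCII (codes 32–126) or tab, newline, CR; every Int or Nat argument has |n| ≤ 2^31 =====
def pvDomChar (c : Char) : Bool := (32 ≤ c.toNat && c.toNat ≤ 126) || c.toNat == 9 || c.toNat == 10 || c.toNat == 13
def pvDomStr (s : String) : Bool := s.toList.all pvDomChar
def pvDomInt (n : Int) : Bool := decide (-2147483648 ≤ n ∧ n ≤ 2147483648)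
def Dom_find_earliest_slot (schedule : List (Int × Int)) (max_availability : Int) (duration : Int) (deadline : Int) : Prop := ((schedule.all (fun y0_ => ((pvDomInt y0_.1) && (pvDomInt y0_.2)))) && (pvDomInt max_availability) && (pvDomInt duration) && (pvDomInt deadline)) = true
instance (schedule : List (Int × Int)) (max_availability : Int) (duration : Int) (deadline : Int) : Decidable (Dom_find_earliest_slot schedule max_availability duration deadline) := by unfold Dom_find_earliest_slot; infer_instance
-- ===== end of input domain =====

-- B replaces A's forward early-return structure (before-first check, indexed loop over
-- interior gaps, after-last check) by one backward scan over candidate slots that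
-- overwrites an accumulator: the first forward match is the last backward match.

-- ===== PORT A =====

-- A's 'for i in range(len(schedule)-1)' with early return: recursion on the index list
def findSlotGapLoop (schedule : List (Int × Int)) (duration deadline : Int) : List Nat → Option Int
  | [] => none
  | i :: is =>
    let gap_start := (schedule.getD i (0, 0)).2
    let gap_end := (schedule.getD (i + 1) (0, 0)).1
    let gap_size := gap_end - gap_start
    if gap_size ≥ duration ∧ gap_start + duration ≤ deadline then some gap_start
    else findSlotGapLoop schedule duration deadline is

def find_earliest_slot (schedule : List (Int × Int)) (max_availability : Int) (duration : Int) (deadline : Int) : Option Int :=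
  if duration > max_availability ∨ duration > deadline ∨ deadline ≤ 0 then none
  else
    let total_used := schedule.foldl (fun acc p => acc + (p.2 - p.1)) 0
    if total_used + duration > max_availability then none
    else if schedule = [] then (if duration ≤ deadline then some 0 else none)
    else if (PySem.List.pyGetD schedule 0 (0, 0)).1 ≥ duration ∧ duration ≤ deadline then some 0
    else
      match findSlotGapLoop schedule duration deadline (List.range (schedule.length - 1)) with
      | some r => some r
      | none =>
        let last_end := (PySem.List.pyGetD schedule (-1) (0, 0)).2
        if last_end + duration ≤ deadline then some last_end else none

-- ===== PORT B =====

-- Source B's loop body: candidate slot i starts at the end of interval i-1 (0 for i = 0);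
-- a fitting slot overwrites the accumulated result
def bStep (schedule : List (Int × Int)) (duration deadline : Int) (res : Option Int) (i : Nat) : Option Int :=
  let prev_end := if i > 0 then (schedule.getD (i - 1) (0, 0)).2 else 0
  if (schedule.getD i (0, 0)).1 - prev_end ≥ duration ∧ prev_end + duration ≤ deadline
  then some prev_end else res

def find_earliest_slot_alt (schedule : List (Int × Int)) (max_availability : Int) (duration : Int) (deadline : Int) : Option Int :=
  if duration > max_availability ∨ duration > deadline ∨ deadline ≤ 0 then none
  else
    let total_used := schedule.foldl (fun acc p => acc + (p.2 - p.1)) 0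
    if total_used + duration > max_availability then none
    else
      let last_end := if schedule = [] then 0 else (PySem.List.pyGetD schedule (-1) (0, 0)).2
      let res0 := if last_end + duration ≤ deadline then some last_end else none
      -- range(len(schedule)-1, -1, -1) = the indices 0..len-1 in descending order
      ((List.range schedule.length).reverse).foldl (bStep schedule duration deadline) res0

-- ===== PRECONDITION & SPEC =====
def Spec_find_earliest_slot (schedule : List (Int × Int)) (max_availability : Int) (duration : Int) (deadline : Int) (out : Option Int) : Prop := out = find_earliest_slot_alt schedule max_availability duration deadline
instance (schedule : List (Int × Int)) (max_availability : Int) (duration : Int) (deadline : Int) (out : Option Int) : Decidable (Spec_find_earliest_slot schedule max_availability duration deadline out) := by unfold Spec_find_earliest_slot; infer_instance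

-- ===== CLAIM (what is proved, stated in full; the proofs are below) =====
def Claim_equal_find_earliest_slot : Prop := ∀ (schedule : List (Int × Int)) (max_availability : Int) (duration : Int) (deadline : Int), Dom_find_earliest_slot schedule max_availability duration deadline → Spec_find_earliest_slot schedule max_availability duration deadline (find_earliest_slot schedule max_availability duration deadline)

-- ===== LEMMAS AND PROOFS =====

-- proof-only helper: first fitting candidate slot, scanning index list left to right
def ffFit (schedule : List (Int × Int)) (duration deadline : Int) : List Nat → Option Int
  | [] => none
  | i :: is =>
    let prev_end := if i > 0 then (schedule.getD (i - 1) (0, 0)).2 else 0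
    if (schedule.getD i (0, 0)).1 - prev_end ≥ duration ∧ prev_end + duration ≤ deadline
    then some prev_end else ffFit schedule duration deadline is

-- the backward overwrite fold computes the first forward match (with default r)
theorem foldl_reverse_eq_ffFit (schedule : List (Int × Int)) (d dl : Int)
    (is : List Nat) (r : Option Int) :
    is.reverse.foldl (bStep schedule d dl) r
      = (match ffFit schedule d dl is with | some v => some v | none => r) := by
  induction is generalizing r with
  | nil => rfl
  | cons a is ih =>
    rw [List.reverse_cons, List.foldl_append, ih]
    simp only [List.foldl_cons, List.foldl_nil, ffFit, bStep]
    split_ifs <;> rfl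

-- on successor indices, ffFit is exactly A's interior-gap loop
theorem ffFit_succ (schedule : List (Int × Int)) (d dl : Int) (is : List Nat) :
    ffFit schedule d dl (is.map Nat.succ) = findSlotGapLoop schedule d dl is := by
  induction is with
  | nil => rfl
  | cons i is ih =>
    simp only [List.map_cons, ffFit, findSlotGapLoop, Nat.succ_sub_one]
    rw [if_pos (Nat.succ_pos i), ih]

-- ===== VERDICT (by name: the statement is the Claim_ definition above) =====
theorem find_earliest_slot_spec : Claim_equal_find_earliest_slot := by
  intro schedule ma d dl _
  unfold Spec_find_earliest_slot find_earliest_slot find_earliest_slot_alt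
  by_cases hg : d > ma ∨ d > dl ∨ dl ≤ 0
  · simp [hg]
  · simp only [if_neg hg]
    have hdl : d ≤ dl := by omega
    by_cases ht : schedule.foldl (fun acc p => acc + (p.2 - p.1)) 0 + d > ma
    · simp [ht]
    · simp only [if_neg ht]
      match schedule with
      | [] => simp [hdl]
      | ⟨s, e⟩ :: rest =>
        simp only [if_neg (by simp : ¬((s, e) :: rest = []))]
        have hrange : List.range ((s, e) :: rest).length
            = 0 :: (List.range rest.length).map Nat.succ := by
          simp [List.range_succ_eq_map]
        rw [hrange, foldl_reverse_eq_ffFit]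
        have hlen : ((s, e) :: rest).length - 1 = rest.length := by simp
        simp only [ffFit, ffFit_succ, List.getD_cons_zero, gt_iff_lt, lt_self_iff_false,
          if_false, sub_zero, zero_add, hlen, PySem.List.pyGetD_zero_cons, ge_iff_le]
        split_ifs <;> rfl
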